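-- pv_equiv track=rewrite | github.com/abang115/ASLigator | Backend/src/glossing.py | reorder_sentence
-- ===== SOURCE A (Python) =====
-- def reorder_sentence(words):
--     greeting = []
--     sub = []
--     verb = []
--     other = []
--     end_words = []
--     for word in words:
--         low = word.lower()
--         if low in ["hello", "hi"]:
--             greeting.append(word)
--         elif low == "i":
--             sub.append(word)
--         elif low in ["am", "is", "are"]:
--             verb.append(word)
--         elif low == "now":
--             end_words.append(word)
--         else:
--             other.append(word)
--     return greeting + sub + verb + other + end_words
-- ===== SOURCE B (Python) =====
-- def _rank(word):
--     low = word.lower()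
--     if low in ("hello", "hi"):
--         return 0
--     if low == "i":
--         return 1
--     if low in ("am", "is", "are"):
--         return 2
--     if low == "now":
--         return 4
--     return 3
--
--
-- def reorder_sentence(words):
--     return sorted(words, key=_rank)
-- ===== Notes on version B (the rewrite author's own statement) =====
-- stated objective: idiomatic
-- what changed: Replaced the five explicit accumulator buckets and their concatenation by a category-rank key function and a single stable sorted(words, key=rank) call.
import Mathlib
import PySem

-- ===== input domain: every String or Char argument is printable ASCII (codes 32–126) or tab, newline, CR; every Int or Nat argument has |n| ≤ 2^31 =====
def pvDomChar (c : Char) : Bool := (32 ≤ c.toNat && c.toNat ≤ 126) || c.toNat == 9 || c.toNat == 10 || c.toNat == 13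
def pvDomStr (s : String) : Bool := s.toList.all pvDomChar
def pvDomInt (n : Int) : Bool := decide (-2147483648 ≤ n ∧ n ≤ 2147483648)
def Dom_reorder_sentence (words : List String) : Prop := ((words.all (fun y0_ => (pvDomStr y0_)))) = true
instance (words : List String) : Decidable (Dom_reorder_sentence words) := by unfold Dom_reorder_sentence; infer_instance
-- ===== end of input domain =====

-- B replaces A's five explicit accumulator buckets with a stable sort by a category-rank key (idiomatic; same return value).

-- ===== PORT A =====
-- the body of A's for-loop, acting on the five accumulator lists (greeting, sub, verb, other, end_words)
def aStep (st : List String × List String × List String × List String × List String)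
    (word : String) : List String × List String × List String × List String × List String :=
  let low := PySem.Str.lower word
  if low ∈ (["hello", "hi"] : List String) then (st.1 ++ [word], st.2.1, st.2.2.1, st.2.2.2.1, st.2.2.2.2)
  else if low = "i" then (st.1, st.2.1 ++ [word], st.2.2.1, st.2.2.2.1, st.2.2.2.2)
  else if low ∈ (["am", "is", "are"] : List String) then (st.1, st.2.1, st.2.2.1 ++ [word], st.2.2.2.1, st.2.2.2.2)
  else if low = "now" then (st.1, st.2.1, st.2.2.1, st.2.2.2.1, st.2.2.2.2 ++ [word])
  else (st.1, st.2.1, st.2.2.1, st.2.2.2.1 ++ [word], st.2.2.2.2)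

def reorder_sentence (words : List String) : List String :=
  let r := words.foldl aStep ([], [], [], [], [])
  r.1 ++ r.2.1 ++ r.2.2.1 ++ r.2.2.2.1 ++ r.2.2.2.2

-- ===== PORT B =====
-- port of Source B's helper _rank
def rankB (word : String) : Int :=
  let low := PySem.Str.lower word
  if low ∈ (["hello", "hi"] : List String) then 0
  else if low = "i" then 1
  else if low ∈ (["am", "is", "are"] : List String) then 2
  else if low = "now" then 4
  else 3

def reorder_sentence_alt (words : List String) : List String :=
  PySem.List.sorted words rankB

-- ===== PRECONDITION & SPEC =====
def Spec_reorder_sentence (words : List String) (out : List String) : Prop := out = reorder_sentence_alt words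
instance (words : List String) (out : List String) : Decidable (Spec_reorder_sentence words out) := by unfold Spec_reorder_sentence; infer_instance

-- ===== CLAIM (what is proved, stated in full; the proofs are below) =====
def Claim_equal_reorder_sentence : Prop := ∀ (words : List String), Dom_reorder_sentence words → Spec_reorder_sentence words (reorder_sentence words)

-- ===== LEMMAS AND PROOFS =====

-- the rank-k bucket of a word list, as a filter
def bkt (k : Int) (ws : List String) : List String := ws.filter (fun w => rankB w == k)

theorem rank_cases (w : String) :
    rankB w = 0 ∨ rankB w = 1 ∨ rankB w = 2 ∨ rankB w = 3 ∨ rankB w = 4 := by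
  simp only [rankB]
  split_ifs <;> simp

theorem bf_false (x y : String) (hxy : ¬ rankB x < rankB y) :
    decide (rankB x < rankB y) = false := by simp [hxy]

theorem bf_true (x y : String) (hxy : rankB x < rankB y) :
    decide (rankB x < rankB y) = true := by simp [hxy]

theorem insertBy_append_not {α : Type} (before : α → α → Bool) (x : α) (ys zs : List α)
    (h : ∀ y ∈ ys, before x y = false) :
    PySem.List.insertBy before x (ys ++ zs) = ys ++ PySem.List.insertBy before x zs := by
  induction ys with
  | nil => rfl
  | cons y t ih =>
    simp only [List.cons_append, PySem.List.insertBy, h y (by simp)]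
    simp only [Bool.false_eq_true, if_false, List.cons.injEq, true_and]
    exact ih (fun z hz => h z (by simp [hz]))

theorem insertBy_all_before {α : Type} (before : α → α → Bool) (x : α) (zs : List α)
    (h : ∀ y ∈ zs, before x y = true) :
    PySem.List.insertBy before x zs = x :: zs := by
  cases zs with
  | nil => rfl
  | cons z t => simp [PySem.List.insertBy, h z (by simp)]

-- A's loop fills the five accumulators with the five bucket filters
theorem aLoop (ws : List String) :
    ∀ g s v o e : List String,
      ws.foldl aStep (g, s, v, o, e) =
        (g ++ bkt 0 ws, s ++ bkt 1 ws, v ++ bkt 2 ws, o ++ bkt 3 ws, e ++ bkt 4 ws) := by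
  induction ws with
  | nil => intro g s v o e; simp [bkt]
  | cons x t ih =>
    intro g s v o e
    simp only [List.foldl_cons, aStep]
    by_cases c1 : PySem.Str.lower x ∈ (["hello", "hi"] : List String)
    · have hr : rankB x = 0 := by simp [rankB, c1]
      simp only [c1, if_true]
      rw [ih]
      simp [bkt, hr]
    · by_cases c2 : PySem.Str.lower x = "i"
      · have hr : rankB x = 1 := by simp [rankB, c2]
        simp only [c2, if_true]
        rw [ih]
        simp [bkt, hr]
      · by_cases c3 : PySem.Str.lower x ∈ (["am", "is", "are"] : List String)
        · have hr : rankB x = 2 := by simp [rankB, c1, c2, c3]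
          simp only [c2, c3, if_true]
          rw [ih]
          simp [bkt, hr, c1]
        · by_cases c4 : PySem.Str.lower x = "now"
          · have hr : rankB x = 4 := by simp [rankB, c4]
            simp only [c4, if_true]
            rw [ih]
            simp [bkt, hr]
          · have hr : rankB x = 3 := by simp [rankB, c1, c2, c3, c4]
            simp only [c2, c3, c4, if_false]
            rw [ih]
            simp [bkt, hr, c1]

-- inserting by rank into bucketed accumulators appends each word to its own bucket
theorem insFold (ws : List String) :
    ∀ C0 C1 C2 C3 C4 : List String,
      (∀ y ∈ C0, rankB y = 0) → (∀ y ∈ C1, rankB y = 1) → (∀ y ∈ C2, rankB y = 2) →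
      (∀ y ∈ C3, rankB y = 3) → (∀ y ∈ C4, rankB y = 4) →
      ws.foldl (fun acc x => PySem.List.insertBy (fun a b => decide (rankB a < rankB b)) x acc)
          (C0 ++ (C1 ++ (C2 ++ (C3 ++ C4)))) =
        (C0 ++ bkt 0 ws) ++ ((C1 ++ bkt 1 ws) ++ ((C2 ++ bkt 2 ws) ++ ((C3 ++ bkt 3 ws) ++ (C4 ++ bkt 4 ws)))) := by
  induction ws with
  | nil => intro C0 C1 C2 C3 C4 _ _ _ _ _; simp [bkt]
  | cons x t ih =>
    intro C0 C1 C2 C3 C4 h0 h1 h2 h3 h4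
    simp only [List.foldl_cons]
    rcases rank_cases x with h | h | h | h | h
    · -- rankB x = 0
      rw [insertBy_append_not _ x C0 _ (fun y hy => bf_false x y (by rw [h, h0 y hy]; omega))]
      have hall : ∀ y ∈ C1 ++ (C2 ++ (C3 ++ C4)), decide (rankB x < rankB y) = true := by
        intro y hy
        simp only [List.mem_append] at hy
        rcases hy with hy | hy | hy | hy
        · exact bf_true x y (by rw [h, h1 y hy]; omega)
        · exact bf_true x y (by rw [h, h2 y hy]; omega)
        · exact bf_true x y (by rw [h, h3 y hy]; omega)
        · exact bf_true x y (by rw [h, h4 y hy]; omega)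
      rw [insertBy_all_before _ x (C1 ++ (C2 ++ (C3 ++ C4))) hall]
      have hb : ∀ y ∈ C0 ++ [x], rankB y = 0 := by
        intro y hy
        rcases List.mem_append.1 hy with hy | hy
        · exact h0 y hy
        · simp at hy; subst hy; exact h
      have hIH := ih (C0 ++ [x]) C1 C2 C3 C4 hb h1 h2 h3 h4
      rw [show C0 ++ (x :: (C1 ++ (C2 ++ (C3 ++ C4)))) = (C0 ++ [x]) ++ (C1 ++ (C2 ++ (C3 ++ C4))) from by simp, hIH]
      simp [bkt, h, List.append_assoc]
    · -- rankB x = 1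
      rw [insertBy_append_not _ x C0 _ (fun y hy => bf_false x y (by rw [h, h0 y hy]; omega))]
      rw [insertBy_append_not _ x C1 _ (fun y hy => bf_false x y (by rw [h, h1 y hy]; omega))]
      have hall : ∀ y ∈ C2 ++ (C3 ++ C4), decide (rankB x < rankB y) = true := by
        intro y hy
        simp only [List.mem_append] at hy
        rcases hy with hy | hy | hy
        · exact bf_true x y (by rw [h, h2 y hy]; omega)
        · exact bf_true x y (by rw [h, h3 y hy]; omega)
        · exact bf_true x y (by rw [h, h4 y hy]; omega)
      rw [insertBy_all_before _ x (C2 ++ (C3 ++ C4)) hall]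
      have hb : ∀ y ∈ C1 ++ [x], rankB y = 1 := by
        intro y hy
        rcases List.mem_append.1 hy with hy | hy
        · exact h1 y hy
        · simp at hy; subst hy; exact h
      have hIH := ih C0 (C1 ++ [x]) C2 C3 C4 h0 hb h2 h3 h4
      rw [show C0 ++ (C1 ++ (x :: (C2 ++ (C3 ++ C4)))) = C0 ++ ((C1 ++ [x]) ++ (C2 ++ (C3 ++ C4))) from by simp, hIH]
      simp [bkt, h, List.append_assoc]
    · -- rankB x = 2
      rw [insertBy_append_not _ x C0 _ (fun y hy => bf_false x y (by rw [h, h0 y hy]; omega))]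
      rw [insertBy_append_not _ x C1 _ (fun y hy => bf_false x y (by rw [h, h1 y hy]; omega))]
      rw [insertBy_append_not _ x C2 _ (fun y hy => bf_false x y (by rw [h, h2 y hy]; omega))]
      have hall : ∀ y ∈ C3 ++ C4, decide (rankB x < rankB y) = true := by
        intro y hy
        simp only [List.mem_append] at hy
        rcases hy with hy | hy
        · exact bf_true x y (by rw [h, h3 y hy]; omega)
        · exact bf_true x y (by rw [h, h4 y hy]; omega)
      rw [insertBy_all_before _ x (C3 ++ C4) hall]
      have hb : ∀ y ∈ C2 ++ [x], rankB y = 2 := by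
        intro y hy
        rcases List.mem_append.1 hy with hy | hy
        · exact h2 y hy
        · simp at hy; subst hy; exact h
      have hIH := ih C0 C1 (C2 ++ [x]) C3 C4 h0 h1 hb h3 h4
      rw [show C0 ++ (C1 ++ (C2 ++ (x :: (C3 ++ C4)))) = C0 ++ (C1 ++ ((C2 ++ [x]) ++ (C3 ++ C4))) from by simp, hIH]
      simp [bkt, h, List.append_assoc]
    · -- rankB x = 3
      rw [insertBy_append_not _ x C0 _ (fun y hy => bf_false x y (by rw [h, h0 y hy]; omega))]
      rw [insertBy_append_not _ x C1 _ (fun y hy => bf_false x y (by rw [h, h1 y hy]; omega))]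
      rw [insertBy_append_not _ x C2 _ (fun y hy => bf_false x y (by rw [h, h2 y hy]; omega))]
      rw [insertBy_append_not _ x C3 _ (fun y hy => bf_false x y (by rw [h, h3 y hy]; omega))]
      have hall : ∀ y ∈ C4, decide (rankB x < rankB y) = true := by
        intro y hy
        exact bf_true x y (by rw [h, h4 y hy]; omega)
      rw [insertBy_all_before _ x C4 hall]
      have hb : ∀ y ∈ C3 ++ [x], rankB y = 3 := by
        intro y hy
        rcases List.mem_append.1 hy with hy | hy
        · exact h3 y hy
        · simp at hy; subst hy; exact h
      have hIH := ih C0 C1 C2 (C3 ++ [x]) C4 h0 h1 h2 hb h4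
      rw [show C0 ++ (C1 ++ (C2 ++ (C3 ++ (x :: C4)))) = C0 ++ (C1 ++ (C2 ++ ((C3 ++ [x]) ++ C4))) from by simp, hIH]
      simp [bkt, h, List.append_assoc]
    · -- rankB x = 4
      rw [insertBy_append_not _ x C0 _ (fun y hy => bf_false x y (by rw [h, h0 y hy]; omega))]
      rw [insertBy_append_not _ x C1 _ (fun y hy => bf_false x y (by rw [h, h1 y hy]; omega))]
      rw [insertBy_append_not _ x C2 _ (fun y hy => bf_false x y (by rw [h, h2 y hy]; omega))]
      rw [insertBy_append_not _ x C3 _ (fun y hy => bf_false x y (by rw [h, h3 y hy]; omega))]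
      rw [PySem.List.insertBy_of_forall_not_before _ x C4 (fun y hy => bf_false x y (by rw [h, h4 y hy]; omega))]
      have hb : ∀ y ∈ C4 ++ [x], rankB y = 4 := by
        intro y hy
        rcases List.mem_append.1 hy with hy | hy
        · exact h4 y hy
        · simp at hy; subst hy; exact h
      have hIH := ih C0 C1 C2 C3 (C4 ++ [x]) h0 h1 h2 h3 hb
      rw [hIH]
      simp [bkt, h, List.append_assoc]

-- B equals the concatenation of the five buckets
theorem altEq (ws : List String) :
    reorder_sentence_alt ws = bkt 0 ws ++ bkt 1 ws ++ bkt 2 ws ++ bkt 3 ws ++ bkt 4 ws := by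
  unfold reorder_sentence_alt
  rw [PySem.List.sorted_eq_foldl_insertBy]
  have h := insFold ws [] [] [] [] [] (by simp) (by simp) (by simp) (by simp) (by simp)
  simp only [List.nil_append] at h
  rw [h]
  simp [List.append_assoc]

-- ===== VERDICT (by name: the statement is the Claim_ definition above) =====
theorem reorder_sentence_spec : Claim_equal_reorder_sentence := by
  intro words _
  unfold Spec_reorder_sentence reorder_sentence
  rw [altEq, aLoop]
  simp [List.append_assoc]
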